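-- pv_equiv track=rewrite | github.com/lucyferg2/medical-research-agent | app/main.py | validate_query
-- ===== SOURCE A (Python) =====
-- def validate_query(query: str) -> bool:
--     """Validate research query for safety and appropriateness"""
--     if not query or len(query.strip()) < 5:
--         return False
--
--     # Check for potentially harmful queries
--     harmful_patterns = [
--         'personal information', 'patient data', 'confidential',
--         'hack', 'breach', 'illegal', 'unauthorized'
--     ]
--
--     query_lower = query.lower()
--     for pattern in harmful_patterns:
--         if pattern in query_lower:
--             return False
--
--     return True
-- ===== SOURCE B (Python) =====
-- HARMFUL_PATTERNS = [
--     'personal information', 'patient data', 'confidential',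
--     'hack', 'breach', 'illegal', 'unauthorized'
-- ]
--
--
-- def validate_query(query: str) -> bool:
--     """Validate research query: one left-to-right scan of the lowered query,
--     testing at each position whether any harmful pattern begins there."""
--     if not query or len(query.strip()) < 5:
--         return False
--     q = query.lower()
--     for i in range(len(q)):
--         for p in HARMFUL_PATTERNS:
--             if q.startswith(p, i):
--                 return False
--     return True
-- ===== Notes on version B (the rewrite author's own statement) =====
-- stated objective: alternative
-- what changed: Replaces A's pattern-major loop of N independent full substring searches with a single position-major left-to-right scan of the lowered query that tests at each position whether any pattern starts there.
import Mathlib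
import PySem

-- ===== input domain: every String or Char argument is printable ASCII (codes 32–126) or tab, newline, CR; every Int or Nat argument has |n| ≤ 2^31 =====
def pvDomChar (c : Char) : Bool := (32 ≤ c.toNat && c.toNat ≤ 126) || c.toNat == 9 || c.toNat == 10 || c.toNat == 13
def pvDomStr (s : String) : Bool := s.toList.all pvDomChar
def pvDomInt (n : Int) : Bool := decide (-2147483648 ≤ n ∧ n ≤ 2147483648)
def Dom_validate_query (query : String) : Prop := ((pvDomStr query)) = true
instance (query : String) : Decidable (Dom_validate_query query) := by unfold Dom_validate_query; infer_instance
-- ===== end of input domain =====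

-- B replaces A's pattern-major loop of substring searches with one position-major
-- left-to-right scan of the lowered query (alternative decomposition, same cost class).


-- ===== PORT A =====
def harmfulPatterns : List String :=
  ["personal information", "patient data", "confidential",
   "hack", "breach", "illegal", "unauthorized"]

-- A's 'for pattern in harmful_patterns: if pattern in query_lower: return False'
def checkA (ql : String) : List String → Bool
  | [] => true
  | p :: ps => if PySem.Str.isIn p ql then false else checkA ql ps

def validate_query (query : String) : Bool :=
  if query == "" || PySem.Str.len (PySem.Str.strip query) < 5 then false
  else checkA (PySem.Str.lower query) harmfulPatterns

-- ===== PORT B =====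
-- B's inner 'for p in HARMFUL_PATTERNS: if q.startswith(p, i): return False'
def hitAt (l : List Char) : List String → Bool
  | [] => false
  | p :: ps => PySem.Chars.startswith l p.toList || hitAt l ps

-- B's outer 'for i in range(len(q))' as recursion over suffixes of q
def scanB : List Char → Bool
  | [] => false
  | c :: rest => hitAt (c :: rest) harmfulPatterns || scanB rest

def validate_query_alt (query : String) : Bool :=
  if query == "" || PySem.Str.len (PySem.Str.strip query) < 5 then false
  else !(scanB (PySem.Str.lower query).toList)

-- ===== PRECONDITION & SPEC =====
def Spec_validate_query (query : String) (out : Bool) : Prop := out = validate_query_alt query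
instance (query : String) (out : Bool) : Decidable (Spec_validate_query query out) := by unfold Spec_validate_query; infer_instance

-- ===== CLAIM (what is proved, stated in full; the proofs are below) =====
def Claim_equal_validate_query : Prop := ∀ (query : String), Dom_validate_query query → Spec_validate_query query (validate_query query)

-- ===== LEMMAS AND PROOFS =====

theorem checkA_eq_not_any (ql : String) (ps : List String) :
    checkA ql ps = !(ps.any (fun p => PySem.Str.isIn p ql)) := by
  induction ps with
  | nil => rfl
  | cons p ps ih =>
    simp only [checkA, List.any_cons]
    split_ifs with h
    · have h' : PySem.Chars.isIn p.toList ql.toList = true := by simpa using h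
      simp [h']
    · have h' : PySem.Chars.isIn p.toList ql.toList = false := by simpa using h
      simp [ih, h']

theorem hitAt_eq_any (l : List Char) (ps : List String) :
    hitAt l ps = ps.any (fun p => PySem.Chars.startswith l p.toList) := by
  induction ps with
  | nil => rfl
  | cons p ps ih => simp [hitAt, ih]

theorem hitAt_nil : hitAt [] harmfulPatterns = false := by decide

theorem scanB_eq_true_iff (l : List Char) :
    scanB l = true ↔ ∃ j, hitAt (l.drop j) harmfulPatterns = true := by
  induction l with
  | nil =>
    simp only [scanB, List.drop_nil]
    simp [hitAt_nil]
  | cons c rest ih =>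
    simp only [scanB, Bool.or_eq_true, ih]
    constructor
    · rintro (h | ⟨j, hj⟩)
      · exact ⟨0, h⟩
      · exact ⟨j + 1, hj⟩
    · rintro ⟨j, hj⟩
      cases j with
      | zero => exact Or.inl hj
      | succ j => exact Or.inr ⟨j, hj⟩

theorem scanB_eq_not_checkA (ql : String) :
    (!(scanB ql.toList)) = checkA ql harmfulPatterns := by
  rw [checkA_eq_not_any]
  congr 1
  rw [Bool.eq_iff_iff, scanB_eq_true_iff, List.any_eq_true]
  constructor
  · rintro ⟨j, hj⟩
    rw [hitAt_eq_any, List.any_eq_true] at hj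
    obtain ⟨p, hp, hsw⟩ := hj
    refine ⟨p, hp, ?_⟩
    rw [PySem.Str.isIn_iff_infix]
    rw [PySem.Chars.startswith_iff] at hsw
    have hIn : PySem.Chars.isIn p.toList ql.toList = true :=
      (PySem.Chars.exists_prefix_drop_iff_isIn p.toList ql.toList).mp ⟨j, hsw⟩
    exact (PySem.Chars.isIn_iff_infix p.toList ql.toList).mp hIn
  · rintro ⟨p, hp, hin⟩
    rw [PySem.Str.isIn_iff_infix, ← PySem.Chars.isIn_iff_infix,
      ← PySem.Chars.exists_prefix_drop_iff_isIn] at hin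
    obtain ⟨j, hj⟩ := hin
    refine ⟨j, ?_⟩
    rw [hitAt_eq_any, List.any_eq_true]
    exact ⟨p, hp, (PySem.Chars.startswith_iff _ _).mpr hj⟩

-- ===== VERDICT (by name: the statement is the Claim_ definition above) =====
theorem validate_query_spec : Claim_equal_validate_query := by
  intro query _
  unfold Spec_validate_query validate_query validate_query_alt
  split
  · rfl
  · exact (scanB_eq_not_checkA (PySem.Str.lower query)).symm
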